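-- pv_equiv track=rewrite | github.com/DStheG/code-practice | HackerRank/organizing-containers-of-balls.py | organizingContainers
-- ===== SOURCE A (Python) =====
-- def organizingContainers(container):
--   sum_rows = [sum(x) for x in container]
--   sum_cols = [sum(x) for x in zip(*container)]
--
--   vote = []
--   for i in range(len(container)):
--     for j in range(len(container[0])):
--       a = sum_rows[i] - container[i][j]
--       b = sum_cols[j] - container[i][j]
--       if(a == b):
--         vote.append(j)
--
--   vote = list(set(vote))
--   if(len(vote) == len(container)):
--     return 'Possible'
--   else:
--     return 'Impossible'
-- ===== SOURCE B (Python) =====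
-- def organizingContainers(container):
--     sum_rows = [sum(r) for r in container]
--     sum_cols = [sum(c) for c in zip(*container)]
--     rowset = set(sum_rows)
--     count = sum(1 for cs in sum_cols if cs in rowset)
--     return 'Possible' if count == len(container) else 'Impossible'
-- ===== Notes on version B (the rewrite author's own statement) =====
-- stated objective: simpler
-- what changed: Replaces A's nested rows x cols voting loop (appending matching column indices and deduplicating them at the end) by a set of row sums and a single linear membership scan over the column sums.
import Mathlib
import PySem

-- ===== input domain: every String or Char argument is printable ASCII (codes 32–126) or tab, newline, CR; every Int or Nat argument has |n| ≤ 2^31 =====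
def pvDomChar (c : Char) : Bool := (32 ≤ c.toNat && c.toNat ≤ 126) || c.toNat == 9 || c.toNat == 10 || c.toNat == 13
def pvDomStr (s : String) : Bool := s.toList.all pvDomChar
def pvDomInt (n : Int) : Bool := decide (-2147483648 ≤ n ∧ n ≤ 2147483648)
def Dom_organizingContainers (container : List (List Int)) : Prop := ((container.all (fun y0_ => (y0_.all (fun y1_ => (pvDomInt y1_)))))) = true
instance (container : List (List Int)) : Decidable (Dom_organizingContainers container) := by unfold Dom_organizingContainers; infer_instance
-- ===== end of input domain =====

-- B replaces A's nested i×j voting loop (plus dedup of votes) by a set of row sums and one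
-- linear membership scan over the column sums; equal return value wherever A returns.

-- zip(*container): the j-th column for each j below the minimum row length (exact to Python's zip;
-- r.getD j 0 is r[j], in range because j < every row's length)
def pvZipCols (container : List (List Int)) : List (List Int) :=
  (List.range (((container.map List.length).min?).getD 0)).map
    (fun j => container.map (fun r => r.getD j 0))

-- ===== PORT A =====
def organizingContainers (container : List (List Int)) : String :=
  let sumRows := container.map List.sum
  let sumCols := (pvZipCols container).map List.sum
  -- nested loops: for i in range(len(container)): for j in range(len(container[0])): …
  -- (all indexings are in range on Pre_; getD is the in-range access)
  let vote := (List.range container.length).foldl (fun v i =>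
      (List.range (container.headD []).length).foldl (fun v j =>
        let c := (container.getD i []).getD j 0
        let a := sumRows.getD i 0 - c
        let b := sumCols.getD j 0 - c
        if a == b then v ++ [j] else v) v) ([] : List Nat)
  let voteS := PySem.Set.ofList vote   -- vote = list(set(vote)); only its length is used
  if voteS.length == container.length then "Possible" else "Impossible"

-- ===== PORT B =====
def organizingContainers_alt (container : List (List Int)) : String :=
  let sumRows := container.map List.sum
  let sumCols := (pvZipCols container).map List.sum
  let rowset := PySem.Set.ofList sumRows
  let count := sumCols.foldl (fun acc cs => if rowset.contains cs then acc + 1 else acc) (0 : Int)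
  if count == (container.length : Int) then "Possible" else "Impossible"

-- ===== PRECONDITION & SPEC =====
-- Pre_ excludes exactly the ragged inputs on which A raises IndexError: A indexes columns
-- 0..len(container[0])-1 of every row, so it returns iff every row is at least as long as row 0.
def Pre_organizingContainers (container : List (List Int)) : Prop :=
  ∀ r ∈ container, (container.headD []).length ≤ r.length
instance (container : List (List Int)) : Decidable (Pre_organizingContainers container) := by
  unfold Pre_organizingContainers; infer_instance
def pvWitness_organizingContainers : List (List Int) := [[1, 1], [0, 2]]

def Spec_organizingContainers (container : List (List Int)) (out : String) : Prop := out = organizingContainers_alt container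
instance (container : List (List Int)) (out : String) : Decidable (Spec_organizingContainers container out) := by unfold Spec_organizingContainers; infer_instance

-- ===== CLAIM (what is proved, stated in full; the proofs are below) =====
def Claim_equal_organizingContainers : Prop := ∀ (container : List (List Int)), Dom_organizingContainers container → Pre_organizingContainers container → Spec_organizingContainers container (organizingContainers container)

-- ===== LEMMAS AND PROOFS =====

-- On Pre_, the zip width (minimum row length) is exactly row 0's length.
lemma pv_minLen (container : List (List Int))
    (h : ∀ r ∈ container, (container.headD []).length ≤ r.length) :
    ((container.map List.length).min?).getD 0 = (container.headD []).length := by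
  cases container with
  | nil => simp
  | cons r0 rest =>
    have hmin : (List.map List.length (r0 :: rest)).min? = some r0.length := by
      rw [List.min?_eq_some_iff]
      constructor
      · simp
      · intro b hb
        simp only [List.mem_map] at hb
        obtain ⟨r, hr, rfl⟩ := hb
        simpa using h r hr
    rw [hmin]
    simp

-- A's deduplicated vote count equals the number of column indices whose column sum is a row sum.
lemma pv_countA (sumRows sumCols : List Int) (rows cols : Nat) (hr : sumRows.length = rows) :
    (PySem.Set.ofList ((List.range rows).flatMap
        (fun i => (List.range cols).filter
          (fun j => sumRows.getD i 0 == sumCols.getD j 0)))).length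
      = (List.range cols).countP (fun j => decide (sumCols.getD j 0 ∈ sumRows)) := by
  set v := (List.range rows).flatMap
      (fun i => (List.range cols).filter (fun j => sumRows.getD i 0 == sumCols.getD j 0)) with hv
  have hmem : ∀ j, j ∈ v ↔ j ∈ (List.range cols).filter (fun j => decide (sumCols.getD j 0 ∈ sumRows)) := by
    intro j
    simp only [hv, List.mem_flatMap, List.mem_filter, List.mem_range, beq_iff_eq, decide_eq_true_eq]
    constructor
    · rintro ⟨i, hi, hj, heq⟩
      refine ⟨hj, ?_⟩
      have hil : i < sumRows.length := by omega
      rw [← heq, List.getD_eq_getElem sumRows 0 hil]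
      exact List.getElem_mem hil
    · rintro ⟨hj, hmem⟩
      obtain ⟨i, hil, hi⟩ := List.mem_iff_getElem.mp hmem
      refine ⟨i, by omega, hj, ?_⟩
      rw [List.getD_eq_getElem sumRows 0 hil, hi]
  have hperm : (PySem.Set.ofList v).Perm
      ((List.range cols).filter (fun j => decide (sumCols.getD j 0 ∈ sumRows))) := by
    rw [List.perm_ext_iff_of_nodup (PySem.Set.nodup_ofList v)
      ((List.nodup_range).filter _)]
    intro a
    rw [PySem.Set.mem_ofList]
    exact hmem a
  rw [hperm.length_eq, ← List.countP_eq_length_filter]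

theorem organizingContainers_spec : Claim_equal_organizingContainers := by
  intro container _ hpre
  unfold Spec_organizingContainers organizingContainers organizingContainers_alt
  simp only [pvZipCols, pv_minLen container hpre]
  set hlen := (container.headD []).length with hh
  set f : Nat → List Int := fun j => container.map (fun r => r.getD j 0) with hf
  -- A's nested loop is a flatMap of filters
  simp only [PySem.List.foldl_append_if_eq_filter, PySem.List.foldl_append_eq_flatMap,
    List.nil_append]
  -- the vote condition cancels the common subtrahend
  have hcancel : ∀ i j : Nat,
      ((container.map List.sum).getD i 0 - (container.getD i []).getD j 0 ==
        (((List.range hlen).map f).map List.sum).getD j 0 - (container.getD i []).getD j 0)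
      = ((container.map List.sum).getD i 0 == (((List.range hlen).map f).map List.sum).getD j 0) := by
    intro i j
    simp [sub_left_inj]
  simp only [hcancel]
  -- A's side: dedup-count = countP over column indices
  rw [pv_countA (container.map List.sum) (((List.range hlen).map f).map List.sum)
      container.length hlen (by simp)]
  -- B's side: the counting fold is a countP over the column-sum list
  rw [PySem.List.foldl_if_add_one
      (fun cs => (PySem.Set.ofList (container.map List.sum)).contains cs)
      (((List.range hlen).map f).map List.sum) 0]
  -- identify the two counts
  have hcnt : (((List.range hlen).map f).map List.sum).countP
        (fun cs => (PySem.Set.ofList (container.map List.sum)).contains cs)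
      = (List.range hlen).countP
        (fun j => decide ((((List.range hlen).map f).map List.sum).getD j 0 ∈ container.map List.sum)) := by
    rw [List.map_map, List.countP_map]
    apply List.countP_congr
    intro j hj
    simp only [List.mem_range] at hj
    rw [PySem.List.getD_map_range (List.sum ∘ f) hlen j 0 hj]
    simp [pysem, PySem.Set.mem_ofList, Function.comp]
  rw [hcnt]
  -- both verdicts compare the same count with len(container)
  simp
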